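-- pv_equiv track=rewrite | github.com/raven-dev-ops/ETL-Identity-Data-Ruleset-Engine | src/etl_identity_engine/ingest/public_safety_rehearsal.py | _assign_incidents_to_source_systems
-- ===== SOURCE A (Python) =====
-- def _assign_incidents_to_source_systems(
--     incident_rows: list[dict[str, str]],
--     requested_source_systems: tuple[str, ...],
-- ) -> dict[str, list[dict[str, str]]]:
--     assignments = {source_system: [] for source_system in requested_source_systems}
--     if not requested_source_systems:
--         return assignments
--
--     sorted_rows = [dict(row) for row in sorted(incident_rows, key=lambda row: str(row.get("incident_id", "")))]
--     if len(requested_source_systems) == 1: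
--         source_system = requested_source_systems[0]
--         assignments[source_system] = [{**row, "source_system": source_system} for row in sorted_rows]
--         return assignments
--
--     observed = {
--         source_system: [dict(row) for row in sorted_rows if str(row.get("source_system", "")).strip() == source_system]
--         for source_system in requested_source_systems
--     }
--     if all(observed[source_system] for source_system in requested_source_systems):
--         return observed
--
--     for index, row in enumerate(sorted_rows):
--         source_system = requested_source_systems[index % len(requested_source_systems)]
--         assignments[source_system].append({**row, "source_system": source_system})
--     return assignments
-- ===== SOURCE B (Python) =====
-- def _assign_incidents_to_source_systems(
--     incident_rows: list[dict[str, str]],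
--     requested_source_systems: tuple[str, ...],
-- ) -> dict[str, list[dict[str, str]]]:
--     if not requested_source_systems:
--         return {}
--
--     rows = [dict(row) for row in sorted(incident_rows, key=lambda row: str(row.get("incident_id", "")))]
--     if len(requested_source_systems) == 1:
--         only = requested_source_systems[0]
--         return {only: [{**row, "source_system": only} for row in rows]}
--
--     # single pass over the rows instead of one filter scan per source system
--     buckets = {source_system: [] for source_system in requested_source_systems}
--     for row in rows:
--         label = str(row.get("source_system", "")).strip()
--         if label in buckets:
--             buckets[label].append(dict(row))
--     if all(buckets.values()):
--         return buckets
--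
--     assignments = {source_system: [] for source_system in requested_source_systems}
--     for index, row in enumerate(rows):
--         source_system = requested_source_systems[index % len(requested_source_systems)]
--         assignments[source_system].append({**row, "source_system": source_system})
--     return assignments
-- ===== Notes on version B (the rewrite author's own statement) =====
-- stated objective: faster
-- what changed: The per-source-system dict comprehension that filter-scans the sorted rows once for every requested system is replaced by a single grouping pass over the rows that appends each row to its system's bucket.
import Mathlib
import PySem

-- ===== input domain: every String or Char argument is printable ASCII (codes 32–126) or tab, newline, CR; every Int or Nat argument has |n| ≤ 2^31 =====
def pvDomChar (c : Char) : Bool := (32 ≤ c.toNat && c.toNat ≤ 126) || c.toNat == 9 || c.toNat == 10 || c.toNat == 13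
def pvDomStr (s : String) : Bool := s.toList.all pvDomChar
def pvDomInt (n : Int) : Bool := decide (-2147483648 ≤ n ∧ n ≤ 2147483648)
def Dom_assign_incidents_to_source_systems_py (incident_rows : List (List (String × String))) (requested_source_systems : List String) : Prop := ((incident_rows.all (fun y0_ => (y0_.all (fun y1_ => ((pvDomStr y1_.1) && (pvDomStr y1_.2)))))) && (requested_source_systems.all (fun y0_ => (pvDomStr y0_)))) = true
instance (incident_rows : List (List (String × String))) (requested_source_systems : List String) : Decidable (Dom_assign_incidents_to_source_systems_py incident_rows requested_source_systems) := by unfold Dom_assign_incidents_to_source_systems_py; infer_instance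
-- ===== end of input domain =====

-- B replaces A's per-source-system filter scans over the sorted rows by ONE grouping pass that appends
-- each row to its own bucket (asymptotically fewer row visits when many systems are requested).
-- dict(row) copies are identity on this association-list representation of dicts.

-- ===== PORT A =====
def assign_incidents_to_source_systems_py (incident_rows : List (List (String × String))) (requested_source_systems : List String) : List (String × List (List (String × String))) :=
  let assignments : PySem.Dict String (List (List (String × String))) :=
    requested_source_systems.foldl (fun d s => d.insert s []) PySem.Dict.empty
  if requested_source_systems.isEmpty then assignments.items
  else
    let sorted_rows : List (List (String × String)) :=
      PySem.List.sorted incident_rows (fun row => (PySem.Dict.mk row).getD "incident_id" "") false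
    if requested_source_systems.length = 1 then
      let source_system := requested_source_systems.getD 0 ""
      ((assignments.insert source_system
        (sorted_rows.map (fun row => ((PySem.Dict.mk row).insert "source_system" source_system).items)))).items
    else
      let observed : PySem.Dict String (List (List (String × String))) :=
        requested_source_systems.foldl
          (fun d s => d.insert s (sorted_rows.filter
            (fun row => PySem.Str.strip ((PySem.Dict.mk row).getD "source_system" "") == s)))
          PySem.Dict.empty
      if requested_source_systems.all (fun s => !(observed.getD s []).isEmpty) then
        observed.items
      else
        ((PySem.List.enumerate sorted_rows).foldl
          (fun d p =>
            let source_system := PySem.List.pyGetD requested_source_systems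
              (PySem.Int.mod p.1 (requested_source_systems.length : Int)) ""
            d.modify source_system []
              (· ++ [((PySem.Dict.mk p.2).insert "source_system" source_system).items]))
          assignments).items

-- ===== PORT B =====
-- B-side helpers
def pvSortKey (row : List (String × String)) : String :=
  (PySem.Dict.mk row).getD "incident_id" ""

def pvLabel (row : List (String × String)) : String :=
  PySem.Str.strip ((PySem.Dict.mk row).getD "source_system" "")

def pvTag (row : List (String × String)) (source_system : String) : List (String × String) :=
  ((PySem.Dict.mk row).insert "source_system" source_system).items

def pvEmptyBuckets (requested_source_systems : List String) : PySem.Dict String (List (List (String × String))) :=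
  requested_source_systems.foldl (fun d s => d.insert s []) PySem.Dict.empty

def assign_incidents_to_source_systems_py_alt (incident_rows : List (List (String × String))) (requested_source_systems : List String) : List (String × List (List (String × String))) :=
  if requested_source_systems.isEmpty then []
  else
    let rows : List (List (String × String)) := PySem.List.sorted incident_rows pvSortKey false
    if requested_source_systems.length = 1 then
      let only := requested_source_systems.getD 0 ""
      [(only, rows.map (fun row => pvTag row only))]
    else
      -- single pass over the rows instead of one filter scan per source system
      let buckets : PySem.Dict String (List (List (String × String))) :=
        rows.foldl
          (fun d row => if d.contains (pvLabel row) then d.modify (pvLabel row) [] (· ++ [row]) else d)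
          (pvEmptyBuckets requested_source_systems)
      if buckets.values.all (fun v => !v.isEmpty) then buckets.items
      else
        ((PySem.List.enumerate rows).foldl
          (fun d p =>
            let source_system := PySem.List.pyGetD requested_source_systems
              (PySem.Int.mod p.1 (requested_source_systems.length : Int)) ""
            d.modify source_system [] (· ++ [pvTag p.2 source_system]))
          (pvEmptyBuckets requested_source_systems)).items

-- ===== PRECONDITION & SPEC =====
def Spec_assign_incidents_to_source_systems_py (incident_rows : List (List (String × String))) (requested_source_systems : List String) (out : List (String × List (List (String × String)))) : Prop := out = assign_incidents_to_source_systems_py_alt incident_rows requested_source_systems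
instance (incident_rows : List (List (String × String))) (requested_source_systems : List String) (out : List (String × List (List (String × String)))) : Decidable (Spec_assign_incidents_to_source_systems_py incident_rows requested_source_systems out) := by unfold Spec_assign_incidents_to_source_systems_py; infer_instance

-- ===== CLAIM (what is proved, stated in full; the proofs are below) =====
def Claim_equal_assign_incidents_to_source_systems_py : Prop := ∀ (incident_rows : List (List (String × String))) (requested_source_systems : List String), Dom_assign_incidents_to_source_systems_py incident_rows requested_source_systems → Spec_assign_incidents_to_source_systems_py incident_rows requested_source_systems (assign_incidents_to_source_systems_py incident_rows requested_source_systems)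

-- ===== LEMMAS AND PROOFS =====

-- lookup in a dict built by inserting a key-determined value for every element of a list
theorem pv_getD_foldl_insert {ν : Type} (req : List String) (F : String → ν)
    (d : PySem.Dict String ν) (k : String) (dflt : ν) :
    (req.foldl (fun d s => d.insert s (F s)) d).getD k dflt
      = if k ∈ req then F k else d.getD k dflt := by
  induction req generalizing d with
  | nil => simp
  | cons x t ih =>
    simp only [List.foldl_cons, ih, PySem.Dict.getD_insert, List.mem_cons]
    by_cases hx : k = x <;> by_cases ht : k ∈ t <;> simp [hx, ht]

theorem pv_keys_foldl_insert_empty {ν : Type} (req : List String) (F : String → ν) :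
    ((req.foldl (fun d s => d.insert s (F s)) PySem.Dict.empty : PySem.Dict String ν)).keys
      = PySem.Set.ofList req := by
  have h := PySem.Dict.keys_foldl_insert req (fun _ s => F s) PySem.Dict.empty
  simpa [PySem.Set.update, PySem.Set.ofList_eq_foldl] using h

-- one guarded grouping pass appends, per present key, exactly the rows that match it
theorem pv_getD_group_pass (rows : List (List (String × String)))
    (d : PySem.Dict String (List (List (String × String)))) (k : String)
    (hk : d.contains k = true) :
    (rows.foldl
        (fun d row => if d.contains (pvLabel row) then d.modify (pvLabel row) [] (· ++ [row]) else d)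
        d).getD k []
      = d.getD k [] ++ rows.filter (fun row => pvLabel row == k) := by
  induction rows generalizing d with
  | nil => simp
  | cons r t ih =>
    simp only [List.foldl_cons, List.filter_cons]
    by_cases hc : d.contains (pvLabel r) = true
    · have hk' : (d.modify (pvLabel r) [] (· ++ [r])).contains k = true := by
        simp [PySem.Dict.contains_modify, hk]
      rw [if_pos hc, ih _ hk', PySem.Dict.getD_modify]
      by_cases he : pvLabel r = k
      · simp [he, List.append_assoc]
      · have : ¬ (k = pvLabel r) := fun h => he h.symm
        simp [this, he]
    · have he : pvLabel r ≠ k := by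
        intro h; rw [h] at hc; exact hc hk
      rw [if_neg hc, ih _ hk]
      simp [he]

-- the guarded grouping pass never changes the key list
theorem pv_keys_group_pass (rows : List (List (String × String)))
    (d : PySem.Dict String (List (List (String × String)))) :
    (rows.foldl
        (fun d row => if d.contains (pvLabel row) then d.modify (pvLabel row) [] (· ++ [row]) else d)
        d).keys = d.keys := by
  induction rows generalizing d with
  | nil => rfl
  | cons r t ih =>
    simp only [List.foldl_cons]
    by_cases hc : d.contains (pvLabel r) = true
    · rw [if_pos hc, ih, PySem.Dict.keys_modify, PySem.Dict.keys_insert_of_contains]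
      exact hc
    · rw [if_neg hc, ih]

-- all over a list equals all over its set of distinct elements
theorem pv_all_ofList (req : List String) (p : String → Bool) :
    req.all p = (PySem.Set.ofList req).all p := by
  rcases h : (PySem.Set.ofList req).all p with _ | _
  · rw [List.all_eq_false] at h
    obtain ⟨x, hx, hpx⟩ := h
    rw [PySem.Set.mem_ofList] at hx
    exact List.all_eq_false.2 ⟨x, hx, hpx⟩
  · rw [List.all_eq_true] at h ⊢
    intro x hx
    exact h x ((PySem.Set.mem_ofList req x).2 hx)

-- A's per-system filter dict equals B's single-pass bucket dict
theorem pv_observed_eq_buckets (rows : List (List (String × String))) (req : List String) :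
    (req.foldl
        (fun d s => d.insert s (rows.filter
          (fun row => PySem.Str.strip ((PySem.Dict.mk row).getD "source_system" "") == s)))
        PySem.Dict.empty : PySem.Dict String (List (List (String × String))))
      = rows.foldl
          (fun d row => if d.contains (pvLabel row) then d.modify (pvLabel row) [] (· ++ [row]) else d)
          (pvEmptyBuckets req) := by
  show (req.foldl
        (fun d s => d.insert s (rows.filter (fun row => pvLabel row == s)))
        PySem.Dict.empty : PySem.Dict String (List (List (String × String))))
      = _
  apply PySem.Dict.ext
  have hko : (req.foldl
      (fun d s => d.insert s (rows.filter (fun row => pvLabel row == s)))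
      PySem.Dict.empty : PySem.Dict String (List (List (String × String)))).keys
      = PySem.Set.ofList req :=
    pv_keys_foldl_insert_empty req _
  have hkb : (rows.foldl
      (fun d row => if d.contains (pvLabel row) then d.modify (pvLabel row) [] (· ++ [row]) else d)
      (pvEmptyBuckets req)).keys = PySem.Set.ofList req := by
    rw [pv_keys_group_pass]
    exact pv_keys_foldl_insert_empty req _
  have hnd : (PySem.Set.ofList req).Nodup := PySem.Set.nodup_ofList req
  rw [PySem.Dict.items_eq_map_keys _ (by rw [hko]; exact hnd) ([] : List (List (String × String))),
      PySem.Dict.items_eq_map_keys _ (by rw [hkb]; exact hnd) ([] : List (List (String × String))),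
      hko, hkb]
  apply List.map_congr_left
  intro k hk
  have hkreq : k ∈ req := (PySem.Set.mem_ofList req k).1 hk
  have hcont : (pvEmptyBuckets req).contains k = true := by
    rw [PySem.Dict.contains_iff_mem_keys]
    unfold pvEmptyBuckets
    rw [pv_keys_foldl_insert_empty req (fun _ => [])]
    exact hk
  rw [pv_getD_group_pass rows _ k hcont, pv_getD_foldl_insert]
  unfold pvEmptyBuckets
  rw [pv_getD_foldl_insert]
  simp [hkreq]

-- B's emptiness test over the values equals A's test over the requested list
theorem pv_cond_eq (req : List String) (B : PySem.Dict String (List (List (String × String))))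
    (hkb : B.keys = PySem.Set.ofList req) :
    req.all (fun s => !(B.getD s []).isEmpty) = B.values.all (fun v => !v.isEmpty) := by
  rw [PySem.Dict.values_eq_map_keys B (by rw [hkb]; exact PySem.Set.nodup_ofList req) ([] : List (List (String × String))),
      List.all_map, hkb, pv_all_ofList]
  rfl

-- ===== VERDICT (by name: the statement is the Claim_ definition above) =====
theorem assign_incidents_to_source_systems_py_spec : Claim_equal_assign_incidents_to_source_systems_py := by
  intro rows req _
  show assign_incidents_to_source_systems_py rows req = assign_incidents_to_source_systems_py_alt rows req
  by_cases h0 : req.isEmpty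
  · rw [List.isEmpty_iff] at h0; subst h0; rfl
  · by_cases h1 : req.length = 1
    · obtain ⟨s, hs⟩ : ∃ s, req = [s] := List.length_eq_one_iff.1 h1
      subst hs
      simp only [assign_incidents_to_source_systems_py, assign_incidents_to_source_systems_py_alt,
        List.isEmpty_cons, List.foldl_cons, List.foldl_nil, PySem.Dict.insert_insert_self,
        List.length_cons, List.length_nil, if_pos, Bool.false_eq_true, if_false,
        List.getD_cons_zero, pvTag]
      rw [show PySem.List.sorted rows pvSortKey false
            = PySem.List.sorted rows (fun row => (PySem.Dict.mk row).getD "incident_id" "") false from rfl]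
      rw [PySem.Dict.items_insert_of_not_contains _ _ (PySem.Dict.contains_empty s)]
      rfl
    · simp only [assign_incidents_to_source_systems_py, assign_incidents_to_source_systems_py_alt,
        h0, h1, Bool.false_eq_true, if_false]
      have hsort : (PySem.List.sorted rows pvSortKey false)
          = PySem.List.sorted rows (fun row => (PySem.Dict.mk row).getD "incident_id" "") false := rfl
      rw [hsort]
      have hobs := pv_observed_eq_buckets
        (PySem.List.sorted rows (fun row => (PySem.Dict.mk row).getD "incident_id" "") false) req
      have hkb : (List.foldl
          (fun d row => if d.contains (pvLabel row) then d.modify (pvLabel row) [] (· ++ [row]) else d)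
          (pvEmptyBuckets req)
          (PySem.List.sorted rows (fun row => (PySem.Dict.mk row).getD "incident_id" "") false)).keys
          = PySem.Set.ofList req := by
        rw [pv_keys_group_pass]
        unfold pvEmptyBuckets
        exact pv_keys_foldl_insert_empty req (fun _ => [])
      rw [hobs, pv_cond_eq req _ hkb]
      rfl
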